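-- pv_equiv track=rewrite | github.com/Charlio93/Advent-code | Calendar_4.py | diagonal_to_string
-- ===== SOURCE A (Python) =====
-- def diagonal_to_string(matrix):
--     max_y = len(matrix)     # Alto de la matriz (filas)
--     max_x = len(matrix[0])  # Ancho de la matriz (columnas)
--     diagonals = []
--
--     # Diagonales hacia abajo y derecha
--     # Desde la primera fila
--     for start_x in range(max_x):  # Comenzamos desde cada columna de la primera fila
--         texto = ''
--         x = start_x
--         y = 0
--         while x < max_x and y < max_y:
--             texto += str(matrix[y][x])
--             x += 1
--             y += 1
--         diagonals.append(texto)
--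
--     # Desde la primera columna (excepto el primer elemento, que ya está cubierto)
--     for start_y in range(1, max_y):  # Comenzamos desde cada fila de la primera columna
--         texto = ''
--         x = 0
--         y = start_y
--         while x < max_x and y < max_y:
--             texto += str(matrix[y][x])
--             x += 1
--             y += 1
--         diagonals.append(texto)
--
--     # Diagonales hacia abajo y izquierda
--     # Desde la última fila
--     for start_x in range(max_x - 1, -1, -1):  #los dos primeros -1 ajustan del valor de columnas al indice, con el tercer -1 indico que quiero decrecer
--         texto = ''
--         x = start_x
--         y = 0
--         while x >= 0 and y < max_y:
--             texto += str(matrix[y][x])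
--             x -= 1
--             y += 1
--         diagonals.append(texto)
--
--     # Desde la última columna (excepto el primer elemento que ya está cubierto)
--     for start_y in range(1, max_y):  # Comenzamos desde cada fila de la última columna
--         texto = ''
--         x = max_x - 1
--         y = start_y
--         while x >= 0 and y < max_y:
--             texto += str(matrix[y][x])
--             x -= 1
--             y += 1
--         diagonals.append(texto)
--
--     return diagonals
-- ===== SOURCE B (Python) =====
-- def diagonal_to_string(matrix):
--     max_y = len(matrix)
--     max_x = len(matrix[0])
--     dr = {}  # down-right diagonals, keyed by x - y
--     dl = {}  # down-left diagonals, keyed by x + y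
--     for y in range(max_y):
--         for x in range(max_x):
--             c = str(matrix[y][x])
--             dr[x - y] = dr.get(x - y, '') + c
--             dl[x + y] = dl.get(x + y, '') + c
--     keys_dr = list(range(max_x)) + list(range(-1, -max_y, -1))
--     keys_dl = list(range(max_x - 1, -1, -1)) + list(range(max_x, max_x + max_y - 1))
--     return [dr.get(k, '') for k in keys_dr] + [dl.get(k, '') for k in keys_dl]
-- ===== Notes on version B (the rewrite author's own statement) =====
-- stated objective: alternative
-- what changed: Replaces A's four diagonal-walking loops (one while-loop walk per diagonal with a string accumulator) by a single row-major pass that buckets every cell into two dicts keyed by x-y and x+y, then emits the buckets in A's exact key order.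
import Mathlib
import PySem

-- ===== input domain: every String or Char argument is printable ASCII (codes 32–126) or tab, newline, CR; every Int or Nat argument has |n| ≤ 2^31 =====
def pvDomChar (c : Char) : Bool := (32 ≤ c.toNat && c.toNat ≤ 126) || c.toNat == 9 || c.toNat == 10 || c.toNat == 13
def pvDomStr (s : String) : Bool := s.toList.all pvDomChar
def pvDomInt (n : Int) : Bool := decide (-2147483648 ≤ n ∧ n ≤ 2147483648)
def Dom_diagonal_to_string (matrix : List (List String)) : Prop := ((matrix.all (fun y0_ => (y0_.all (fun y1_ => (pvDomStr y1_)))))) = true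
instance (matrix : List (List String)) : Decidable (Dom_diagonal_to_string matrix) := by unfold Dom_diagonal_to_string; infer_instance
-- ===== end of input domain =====

-- B replaces A's four diagonal-walking while-loops by one row-major pass bucketing cells
-- into two dicts keyed by x-y and x+y, emitted in A's key order (alternative decomposition,
-- same asymptotic cost). Equivalence of RETURN values on Pre_ (inputs where Python A returns).

-- ===== PORT A =====
-- matrix[y][x]; Pre_ guarantees the indices are in range, so the getD default is never used
def pvCell (matrix : List (List String)) (y x : Int) : String :=
  (PySem.List.pyGet? ((PySem.List.pyGet? matrix y).getD []) x).getD ""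

-- the down-right while loop: while x < max_x and y < max_y: texto += matrix[y][x]; x += 1; y += 1
def pvGoDR (matrix : List (List String)) (max_x max_y : Int) (x y : Int) (texto : String) : String :=
  if x < max_x ∧ y < max_y then
    pvGoDR matrix max_x max_y (x + 1) (y + 1) (texto ++ pvCell matrix y x)
  else texto
termination_by (max_y - y).toNat
decreasing_by omega

-- the down-left while loop: while x >= 0 and y < max_y: texto += matrix[y][x]; x -= 1; y += 1
def pvGoDL (matrix : List (List String)) (max_y : Int) (x y : Int) (texto : String) : String :=
  if 0 ≤ x ∧ y < max_y then
    pvGoDL matrix max_y (x - 1) (y + 1) (texto ++ pvCell matrix y x)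
  else texto
termination_by (max_y - y).toNat
decreasing_by omega

def diagonal_to_string (matrix : List (List String)) : List String :=
  let max_y : Int := matrix.length
  let max_x : Int := ((PySem.List.pyGet? matrix 0).getD []).length
  let d1 := (PySem.List.pyRange 0 max_x 1).map (fun start_x => pvGoDR matrix max_x max_y start_x 0 "")
  let d2 := (PySem.List.pyRange 1 max_y 1).map (fun start_y => pvGoDR matrix max_x max_y 0 start_y "")
  let d3 := (PySem.List.pyRange (max_x - 1) (-1) (-1)).map (fun start_x => pvGoDL matrix max_y start_x 0 "")
  let d4 := (PySem.List.pyRange 1 max_y 1).map (fun start_y => pvGoDL matrix max_y (max_x - 1) start_y "")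
  d1 ++ d2 ++ d3 ++ d4

-- ===== PORT B =====
-- one cell: dr[x-y] = dr.get(x-y,'') + c ; dl[x+y] = dl.get(x+y,'') + c
def pvStep (matrix : List (List String)) (y : Int)
    (st : PySem.Dict Int String × PySem.Dict Int String) (x : Int) :
    PySem.Dict Int String × PySem.Dict Int String :=
  let c := pvCell matrix y x
  (st.1.insert (x - y) (st.1.getD (x - y) "" ++ c),
   st.2.insert (x + y) (st.2.getD (x + y) "" ++ c))

def diagonal_to_string_alt (matrix : List (List String)) : List String :=
  let max_y : Int := matrix.length
  let max_x : Int := ((PySem.List.pyGet? matrix 0).getD []).length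
  let st := (PySem.List.pyRange 0 max_y 1).foldl
      (fun st y => (PySem.List.pyRange 0 max_x 1).foldl (pvStep matrix y) st)
      (PySem.Dict.empty, PySem.Dict.empty)
  let keys_dr := PySem.List.pyRange 0 max_x 1 ++ PySem.List.pyRange (-1) (-max_y) (-1)
  let keys_dl := PySem.List.pyRange (max_x - 1) (-1) (-1) ++ PySem.List.pyRange max_x (max_x + max_y - 1) 1
  keys_dr.map (fun k => st.1.getD k "") ++ keys_dl.map (fun k => st.2.getD k "")

-- ===== PRECONDITION & SPEC =====
-- Pre_ excludes exactly the inputs where Python A raises IndexError (an empty matrix, or a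
-- row shorter than row 0); B raises the same IndexError there.
def Pre_diagonal_to_string (matrix : List (List String)) : Prop :=
  matrix ≠ [] ∧ ∀ row ∈ matrix, (matrix.headD []).length ≤ row.length
instance (matrix : List (List String)) : Decidable (Pre_diagonal_to_string matrix) := by
  unfold Pre_diagonal_to_string; infer_instance
def pvWitness_diagonal_to_string : List (List String) := [["a", "b"], ["c", "d"]]

def Spec_diagonal_to_string (matrix : List (List String)) (out : List String) : Prop := out = diagonal_to_string_alt matrix
instance (matrix : List (List String)) (out : List String) : Decidable (Spec_diagonal_to_string matrix out) := by unfold Spec_diagonal_to_string; infer_instance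

-- ===== CLAIM (what is proved, stated in full; the proofs are below) =====
def Claim_equal_diagonal_to_string : Prop := ∀ (matrix : List (List String)), Dom_diagonal_to_string matrix → Pre_diagonal_to_string matrix → Spec_diagonal_to_string matrix (diagonal_to_string matrix)

-- ===== LEMMAS AND PROOFS =====

-- concatenation of a list of strings, in order (foldl (++) "")
def pvScat (l : List String) : String := l.foldl (· ++ ·) ""

theorem pvScat_foldl (l : List String) : ∀ s : String, l.foldl (· ++ ·) s = s ++ pvScat l := by
  induction l with
  | nil => intro s; simp [pvScat]
  | cons a l ih =>
    intro s
    rw [List.foldl_cons, ih]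
    conv_rhs => rw [pvScat, List.foldl_cons, ih]
    simp [String.append_assoc]

theorem pvScat_nil : pvScat [] = "" := rfl

theorem pvScat_cons (a : String) (l : List String) : pvScat (a :: l) = a ++ pvScat l := by
  rw [pvScat, List.foldl_cons, pvScat_foldl]; simp

theorem pvScat_append (l1 l2 : List String) : pvScat (l1 ++ l2) = pvScat l1 ++ pvScat l2 := by
  induction l1 with
  | nil => simp [pvScat_nil]
  | cons a l ih => simp [pvScat_cons, ih, String.append_assoc]


-- the down-right while loop yields the concatenation of the cells along its diagonal
theorem pvGoDR_spec (matrix : List (List String)) (mx my : Int) :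
    ∀ (n : Nat) (x y : Int) (t : String), (my - y).toNat = n →
      pvGoDR matrix mx my x y t =
        t ++ pvScat ((List.range (min (mx - x) (my - y)).toNat).map
          (fun (i : Nat) => pvCell matrix (y + (i : Int)) (x + (i : Int)))) := by
  intro n
  induction n with
  | zero =>
    intro x y t hn
    rw [pvGoDR]
    rw [if_neg (by omega)]
    have h0 : (min (mx - x) (my - y)).toNat = 0 := by omega
    simp [h0, pvScat_nil]
  | succ n ih =>
    intro x y t hn
    rw [pvGoDR]
    by_cases h : x < mx ∧ y < my
    · rw [if_pos h, ih (x + 1) (y + 1) _ (by omega)]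
      have hm : (min (mx - x) (my - y)).toNat = (min (mx - (x + 1)) (my - (y + 1))).toNat + 1 := by
        omega
      rw [hm, List.range_succ_eq_map, List.map_cons, List.map_map, pvScat_cons]
      have hf : ((fun (i : Nat) => pvCell matrix (y + (i : Int)) (x + (i : Int))) ∘ Nat.succ)
          = (fun i : Nat => pvCell matrix (y + 1 + (i : Int)) (x + 1 + (i : Int))) := by
        funext i
        simp only [Function.comp_apply]
        congr 1 <;> push_cast <;> ring
      rw [hf]
      simp [String.append_assoc]
    · rw [if_neg h]
      have h0 : (min (mx - x) (my - y)).toNat = 0 := by omega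
      simp [h0, pvScat_nil]

-- the down-left while loop yields the concatenation of the cells along its diagonal
theorem pvGoDL_spec (matrix : List (List String)) (my : Int) :
    ∀ (n : Nat) (x y : Int) (t : String), (my - y).toNat = n →
      pvGoDL matrix my x y t =
        t ++ pvScat ((List.range (min (x + 1) (my - y)).toNat).map
          (fun (i : Nat) => pvCell matrix (y + (i : Int)) (x - (i : Int)))) := by
  intro n
  induction n with
  | zero =>
    intro x y t hn
    rw [pvGoDL]
    rw [if_neg (by omega)]
    have h0 : (min (x + 1) (my - y)).toNat = 0 := by omega
    simp [h0, pvScat_nil]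
  | succ n ih =>
    intro x y t hn
    rw [pvGoDL]
    by_cases h : 0 ≤ x ∧ y < my
    · rw [if_pos h, ih (x - 1) (y + 1) _ (by omega)]
      have hm : (min (x + 1) (my - y)).toNat = (min ((x - 1) + 1) (my - (y + 1))).toNat + 1 := by
        omega
      rw [hm, List.range_succ_eq_map, List.map_cons, List.map_map, pvScat_cons]
      have hf : ((fun i : Nat => pvCell matrix (y + (i : Int)) (x - (i : Int))) ∘ Nat.succ)
          = (fun i : Nat => pvCell matrix (y + 1 + (i : Int)) (x - 1 - (i : Int))) := by
        funext i
        simp only [Function.comp_apply]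
        congr 1 <;> push_cast <;> ring
      rw [hf]
      simp [String.append_assoc]
    · rw [if_neg h]
      have h0 : (min (x + 1) (my - y)).toNat = 0 := by omega
      simp [h0, pvScat_nil]

-- one row of B's pass, seen through the down-right dict at key d
theorem pvInner_fst (matrix : List (List String)) (y d : Int) :
    ∀ (xs : List Int) (st : PySem.Dict Int String × PySem.Dict Int String),
      ((xs.foldl (pvStep matrix y) st).1).getD d "" =
        st.1.getD d "" ++ pvScat (xs.map (fun x => if x - y = d then pvCell matrix y x else "")) := by
  intro xs
  induction xs with
  | nil => intro st; simp [pvScat_nil]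
  | cons x xs ih =>
    intro st
    rw [List.foldl_cons, ih, List.map_cons, pvScat_cons, ← String.append_assoc]
    congr 1
    show ((st.1.insert (x - y) (st.1.getD (x - y) "" ++ pvCell matrix y x)).getD d "") = _
    rw [PySem.Dict.getD_insert]
    by_cases h : x - y = d
    · rw [if_pos h.symm, if_pos h, h]
    · rw [if_neg (fun hh => h hh.symm), if_neg h]
      simp

-- one row of B's pass, seen through the down-left dict at key s
theorem pvInner_snd (matrix : List (List String)) (y s : Int) :
    ∀ (xs : List Int) (st : PySem.Dict Int String × PySem.Dict Int String),
      ((xs.foldl (pvStep matrix y) st).2).getD s "" =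
        st.2.getD s "" ++ pvScat (xs.map (fun x => if x + y = s then pvCell matrix y x else "")) := by
  intro xs
  induction xs with
  | nil => intro st; simp [pvScat_nil]
  | cons x xs ih =>
    intro st
    rw [List.foldl_cons, ih, List.map_cons, pvScat_cons, ← String.append_assoc]
    congr 1
    show ((st.2.insert (x + y) (st.2.getD (x + y) "" ++ pvCell matrix y x)).getD s "") = _
    rw [PySem.Dict.getD_insert]
    by_cases h : x + y = s
    · rw [if_pos h.symm, if_pos h, h]
    · rw [if_neg (fun hh => h hh.symm), if_neg h]
      simp

-- the whole pass, down-right dict at key d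
theorem pvOuter_fst (matrix : List (List String)) (mx d : Int) :
    ∀ (ys : List Int) (st : PySem.Dict Int String × PySem.Dict Int String),
      ((ys.foldl (fun st y => (PySem.List.pyRange 0 mx 1).foldl (pvStep matrix y) st) st).1).getD d "" =
        st.1.getD d "" ++ pvScat (ys.map (fun y =>
          pvScat ((PySem.List.pyRange 0 mx 1).map (fun x => if x - y = d then pvCell matrix y x else "")))) := by
  intro ys
  induction ys with
  | nil => intro st; simp [pvScat_nil]
  | cons y ys ih =>
    intro st
    rw [List.foldl_cons, ih, pvInner_fst, List.map_cons, pvScat_cons, String.append_assoc]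

-- the whole pass, down-left dict at key s
theorem pvOuter_snd (matrix : List (List String)) (mx s : Int) :
    ∀ (ys : List Int) (st : PySem.Dict Int String × PySem.Dict Int String),
      ((ys.foldl (fun st y => (PySem.List.pyRange 0 mx 1).foldl (pvStep matrix y) st) st).2).getD s "" =
        st.2.getD s "" ++ pvScat (ys.map (fun y =>
          pvScat ((PySem.List.pyRange 0 mx 1).map (fun x => if x + y = s then pvCell matrix y x else "")))) := by
  intro ys
  induction ys with
  | nil => intro st; simp [pvScat_nil]
  | cons y ys ih =>
    intro st
    rw [List.foldl_cons, ih, pvInner_snd, List.map_cons, pvScat_cons, String.append_assoc]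

-- concatenating an indicator list picks out the (at most one) hit
theorem pvScatInd (t : Int) (c : Int → String) :
    ∀ n : Nat, pvScat ((List.range n).map (fun (k : Nat) => if (k : Int) = t then c (k : Int) else ""))
      = if 0 ≤ t ∧ t < (n : Int) then c t else "" := by
  intro n
  induction n with
  | zero => rw [if_neg (by omega)]; simp [pvScat_nil]
  | succ n ih =>
    rw [List.range_succ, List.map_append, pvScat_append, ih, List.map_cons, List.map_nil,
      pvScat_cons, pvScat_nil]
    by_cases h : (n : Int) = t
    · rw [if_neg (by omega), if_pos h, if_pos (by omega), h]
      simp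
    · rw [if_neg h]
      by_cases h2 : 0 ≤ t ∧ t < (n : Int)
      · rw [if_pos h2, if_pos (by omega)]; simp
      · rw [if_neg h2, if_neg (by omega)]; simp

-- concatenating a windowed list is the concatenation over the window
theorem pvScatWin (g : Nat → String) (lo hi : Nat) :
    ∀ m : Nat, pvScat ((List.range m).map (fun k => if lo ≤ k ∧ k < hi then g k else ""))
      = pvScat ((List.range (min m hi - lo)).map (fun i => g (lo + i))) := by
  intro m
  induction m with
  | zero => simp
  | succ m ih =>
    rw [List.range_succ, List.map_append, pvScat_append, ih, List.map_cons, List.map_nil,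
      pvScat_cons, pvScat_nil]
    by_cases h : lo ≤ m ∧ m < hi
    · have e : min (m + 1) hi - lo = (min m hi - lo) + 1 := by omega
      rw [e, List.range_succ, List.map_append, pvScat_append, if_pos h, List.map_cons,
        List.map_nil, pvScat_cons, pvScat_nil]
      have e2 : lo + (min m hi - lo) = m := by omega
      rw [e2]
    · have e : min (m + 1) hi - lo = min m hi - lo := by omega
      rw [e, if_neg h]
      simp

-- two equal-length range maps with pointwise-equal bodies are equal
theorem pvRangeMapEq {α : Type} (g1 g2 : Nat → α) (n1 n2 : Nat) (hn : n1 = n2)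
    (h : ∀ k, k < n1 → g1 k = g2 k) : (List.range n1).map g1 = (List.range n2).map g2 := by
  subst hn
  exact List.map_congr_left (fun k hk => h k (List.mem_range.mp hk))


-- the two programs, with the lengths abstracted to nonnegative integers
theorem pvMain (matrix : List (List String)) (mx my : Int) (hmx : 0 ≤ mx) (hmy : 0 ≤ my) :
    ((PySem.List.pyRange 0 mx 1).map (fun start_x => pvGoDR matrix mx my start_x 0 "") ++
     (PySem.List.pyRange 1 my 1).map (fun start_y => pvGoDR matrix mx my 0 start_y "") ++
     (PySem.List.pyRange (mx - 1) (-1) (-1)).map (fun start_x => pvGoDL matrix my start_x 0 "") ++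
     (PySem.List.pyRange 1 my 1).map (fun start_y => pvGoDL matrix my (mx - 1) start_y "")) =
    ((PySem.List.pyRange 0 mx 1 ++ PySem.List.pyRange (-1) (-my) (-1)).map
        (fun k => ((PySem.List.pyRange 0 my 1).foldl
            (fun st y => (PySem.List.pyRange 0 mx 1).foldl (pvStep matrix y) st)
            (PySem.Dict.empty, PySem.Dict.empty)).1.getD k "") ++
     (PySem.List.pyRange (mx - 1) (-1) (-1) ++ PySem.List.pyRange mx (mx + my - 1) 1).map
        (fun k => ((PySem.List.pyRange 0 my 1).foldl
            (fun st y => (PySem.List.pyRange 0 mx 1).foldl (pvStep matrix y) st)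
            (PySem.Dict.empty, PySem.Dict.empty)).2.getD k "")) := by
  set st := (PySem.List.pyRange 0 my 1).foldl
      (fun st y => (PySem.List.pyRange 0 mx 1).foldl (pvStep matrix y) st)
      (PySem.Dict.empty, PySem.Dict.empty) with hst
  -- the inner (per-row) concatenations, evaluated
  have hinr : ∀ (y d : Int),
      pvScat ((PySem.List.pyRange 0 mx 1).map (fun x => if x - y = d then pvCell matrix y x else ""))
        = if 0 ≤ y + d ∧ y + d < mx then pvCell matrix y (y + d) else "" := by
    intro y d
    rw [PySem.List.pyRange_one, List.map_map]
    have hf : ((fun x => if x - y = d then pvCell matrix y x else "") ∘ (fun k : Nat => 0 + (k : Int)))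
        = (fun (k : Nat) => if (k : Int) = (y + d) then pvCell matrix y (k : Int) else "") := by
      funext k
      simp only [Function.comp_apply, zero_add]
      split_ifs <;> (first | rfl | omega)
    rw [hf, pvScatInd (y + d) (fun x => pvCell matrix y x) (mx - 0).toNat]
    have hc : (((mx - 0).toNat : Int)) = mx := by omega
    rw [hc]
  have hinl : ∀ (y s : Int),
      pvScat ((PySem.List.pyRange 0 mx 1).map (fun x => if x + y = s then pvCell matrix y x else ""))
        = if 0 ≤ s - y ∧ s - y < mx then pvCell matrix y (s - y) else "" := by
    intro y s
    rw [PySem.List.pyRange_one, List.map_map]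
    have hf : ((fun x => if x + y = s then pvCell matrix y x else "") ∘ (fun k : Nat => 0 + (k : Int)))
        = (fun (k : Nat) => if (k : Int) = (s - y) then pvCell matrix y (k : Int) else "") := by
      funext k
      simp only [Function.comp_apply, zero_add]
      split_ifs <;> (first | rfl | omega)
    rw [hf, pvScatInd (s - y) (fun x => pvCell matrix y x) (mx - 0).toNat]
    have hc : (((mx - 0).toNat : Int)) = mx := by omega
    rw [hc]
  -- the two dict lookups, as guarded column concatenations
  have hdr : ∀ d : Int, st.1.getD d "" =
      pvScat ((List.range my.toNat).map (fun (yy : Nat) =>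
        if 0 ≤ (yy : Int) + d ∧ (yy : Int) + d < mx then pvCell matrix yy ((yy : Int) + d) else "")) := by
    intro d
    rw [hst, pvOuter_fst]
    rw [PySem.Dict.getD_empty, String.empty_append]
    have h1 : (PySem.List.pyRange 0 my 1).map (fun y =>
        pvScat ((PySem.List.pyRange 0 mx 1).map (fun x => if x - y = d then pvCell matrix y x else "")))
        = (PySem.List.pyRange 0 my 1).map (fun y =>
            if 0 ≤ y + d ∧ y + d < mx then pvCell matrix y (y + d) else "") :=
      List.map_congr_left (fun y _ => hinr y d)
    rw [h1, PySem.List.pyRange_one, List.map_map]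
    have hy : (my - 0).toNat = my.toNat := by omega
    rw [hy]
    refine congrArg pvScat (List.map_congr_left ?_)
    intro yy _
    simp only [Function.comp_apply, zero_add]
  have hdl : ∀ s : Int, st.2.getD s "" =
      pvScat ((List.range my.toNat).map (fun (yy : Nat) =>
        if 0 ≤ s - (yy : Int) ∧ s - (yy : Int) < mx then pvCell matrix yy (s - (yy : Int)) else "")) := by
    intro s
    rw [hst, pvOuter_snd]
    rw [PySem.Dict.getD_empty, String.empty_append]
    have h1 : (PySem.List.pyRange 0 my 1).map (fun y =>
        pvScat ((PySem.List.pyRange 0 mx 1).map (fun x => if x + y = s then pvCell matrix y x else "")))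
        = (PySem.List.pyRange 0 my 1).map (fun y =>
            if 0 ≤ s - y ∧ s - y < mx then pvCell matrix y (s - y) else "") :=
      List.map_congr_left (fun y _ => hinl y s)
    rw [h1, PySem.List.pyRange_one, List.map_map]
    have hy : (my - 0).toNat = my.toNat := by omega
    rw [hy]
    refine congrArg pvScat (List.map_congr_left ?_)
    intro yy _
    simp only [Function.comp_apply, zero_add]
  -- segment 1: diagonals starting in the first row, going down-right
  have hs1 : (PySem.List.pyRange 0 mx 1).map (fun start_x => pvGoDR matrix mx my start_x 0 "")
      = (PySem.List.pyRange 0 mx 1).map (fun k => st.1.getD k "") := by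
    refine List.map_congr_left ?_
    intro sx hsx
    rw [PySem.List.mem_pyRange_one] at hsx
    rw [hdr sx, pvGoDR_spec matrix mx my ((my - 0).toNat) sx 0 "" rfl]
    have hconv : (fun (yy : Nat) =>
        if 0 ≤ (yy : Int) + sx ∧ (yy : Int) + sx < mx then pvCell matrix yy ((yy : Int) + sx) else "")
        = (fun (yy : Nat) => if 0 ≤ yy ∧ yy < (mx - sx).toNat then pvCell matrix yy ((yy : Int) + sx) else "") := by
      funext yy; split_ifs <;> (first | rfl | omega)
    rw [hconv, pvScatWin (fun yy => pvCell matrix yy ((yy : Int) + sx)) 0 ((mx - sx).toNat) my.toNat]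
    rw [String.empty_append]
    refine congrArg pvScat (pvRangeMapEq _ _ _ _ (by omega) ?_)
    intro i _
    congr 1 <;> push_cast <;> ring
  -- segment 2: diagonals starting in the first column, going down-right
  have hs2 : (PySem.List.pyRange 1 my 1).map (fun start_y => pvGoDR matrix mx my 0 start_y "")
      = (PySem.List.pyRange (-1) (-my) (-1)).map (fun k => st.1.getD k "") := by
    rw [PySem.List.pyRange_one, PySem.List.pyRange_neg_one, List.map_map, List.map_map]
    refine pvRangeMapEq _ _ _ _ (by omega) ?_
    intro k hk
    simp only [Function.comp_apply]
    rw [hdr (-1 - (k : Int)), pvGoDR_spec matrix mx my ((my - (1 + (k : Int))).toNat) 0 (1 + (k : Int)) "" rfl]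
    have hconv : (fun (yy : Nat) =>
        if 0 ≤ (yy : Int) + (-1 - (k : Int)) ∧ (yy : Int) + (-1 - (k : Int)) < mx
        then pvCell matrix yy ((yy : Int) + (-1 - (k : Int))) else "")
        = (fun (yy : Nat) => if 1 + k ≤ yy ∧ yy < (mx + 1 + (k : Int)).toNat
            then pvCell matrix yy ((yy : Int) + (-1 - (k : Int))) else "") := by
      funext yy; split_ifs <;> (first | rfl | omega)
    rw [hconv, pvScatWin (fun yy => pvCell matrix yy ((yy : Int) + (-1 - (k : Int)))) (1 + k)
      ((mx + 1 + (k : Int)).toNat) my.toNat]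
    rw [String.empty_append]
    refine congrArg pvScat (pvRangeMapEq _ _ _ _ (by omega) ?_)
    intro i _
    congr 1 <;> push_cast <;> ring
  -- segment 3: diagonals starting in the first row, going down-left
  have hs3 : (PySem.List.pyRange (mx - 1) (-1) (-1)).map (fun start_x => pvGoDL matrix my start_x 0 "")
      = (PySem.List.pyRange (mx - 1) (-1) (-1)).map (fun k => st.2.getD k "") := by
    refine List.map_congr_left ?_
    intro sx hsx
    rw [PySem.List.mem_pyRange_neg_one] at hsx
    rw [hdl sx, pvGoDL_spec matrix my ((my - 0).toNat) sx 0 "" rfl]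
    have hconv : (fun (yy : Nat) =>
        if 0 ≤ sx - (yy : Int) ∧ sx - (yy : Int) < mx then pvCell matrix yy (sx - (yy : Int)) else "")
        = (fun (yy : Nat) => if 0 ≤ yy ∧ yy < (sx + 1).toNat then pvCell matrix yy (sx - (yy : Int)) else "") := by
      funext yy; split_ifs <;> (first | rfl | omega)
    rw [hconv, pvScatWin (fun yy => pvCell matrix yy (sx - (yy : Int))) 0 ((sx + 1).toNat) my.toNat]
    rw [String.empty_append]
    refine congrArg pvScat (pvRangeMapEq _ _ _ _ (by omega) ?_)
    intro i _
    congr 1 <;> push_cast <;> ring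
  -- segment 4: diagonals starting in the last column, going down-left
  have hs4 : (PySem.List.pyRange 1 my 1).map (fun start_y => pvGoDL matrix my (mx - 1) start_y "")
      = (PySem.List.pyRange mx (mx + my - 1) 1).map (fun k => st.2.getD k "") := by
    rw [PySem.List.pyRange_one, PySem.List.pyRange_one, List.map_map, List.map_map]
    refine pvRangeMapEq _ _ _ _ (by omega) ?_
    intro k hk
    simp only [Function.comp_apply]
    rw [hdl (mx + (k : Int)), pvGoDL_spec matrix my ((my - (1 + (k : Int))).toNat) (mx - 1) (1 + (k : Int)) "" rfl]
    have hconv : (fun (yy : Nat) =>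
        if 0 ≤ mx + (k : Int) - (yy : Int) ∧ mx + (k : Int) - (yy : Int) < mx
        then pvCell matrix yy (mx + (k : Int) - (yy : Int)) else "")
        = (fun (yy : Nat) => if k + 1 ≤ yy ∧ yy < (mx + (k : Int) + 1).toNat
            then pvCell matrix yy (mx + (k : Int) - (yy : Int)) else "") := by
      funext yy; split_ifs <;> (first | rfl | omega)
    rw [hconv, pvScatWin (fun yy => pvCell matrix yy (mx + (k : Int) - (yy : Int))) (k + 1)
      ((mx + (k : Int) + 1).toNat) my.toNat]
    rw [String.empty_append]
    refine congrArg pvScat (pvRangeMapEq _ _ _ _ (by omega) ?_)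
    intro i _
    congr 1 <;> push_cast <;> ring
  rw [List.map_append, List.map_append, hs1, hs2, hs3, hs4]
  simp [List.append_assoc]

theorem diagonal_to_string_spec : Claim_equal_diagonal_to_string := by
  intro matrix _ _
  unfold Spec_diagonal_to_string
  show diagonal_to_string matrix = diagonal_to_string_alt matrix
  simp only [diagonal_to_string, diagonal_to_string_alt]
  exact pvMain matrix _ _ (Int.natCast_nonneg _) (Int.natCast_nonneg _)
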